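-- pv_equiv track=rewrite | github.com/pypi-data/pypi-mirror-354 | packages/tfq0seo/tfq0seo-2.0.0.tar.gz/tfq0seo-2.0.0/tfq0seo/crawlers/link_analyzer.py | _is_over_optimized_anchor
-- ===== SOURCE A (Python) =====
-- from collections import defaultdict, Counter
--
-- def _is_over_optimized_anchor(anchor_text: str) -> bool:
--     """Check if anchor text appears over-optimized."""
--     # Check for exact match keywords repeated
--     words = anchor_text.lower().split()
--     word_counts = Counter(words)
--
--     # If any word appears more than twice, likely over-optimized
--     if any(count > 2 for count in word_counts.values()):
--         return True
--
--     # Check for commercial keywords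
--     commercial_keywords = ['buy', 'cheap', 'best', 'top', 'review', 'discount']
--     if sum(1 for word in words if word in commercial_keywords) > 2:
--         return True
--
--     return False
-- ===== SOURCE B (Python) =====
-- def _is_over_optimized_anchor(anchor_text: str) -> bool:
--     """Single streaming pass with early exit: no Counter, no second scan."""
--     kw = {'buy', 'cheap', 'best', 'top', 'review', 'discount'}
--     counts = {}
--     commercial = 0
--     for w in anchor_text.lower().split():
--         n = counts.get(w, 0) + 1
--         if n >= 3:
--             return True
--         if w in kw:
--             commercial += 1
--         if commercial > 2:
--             return True
--         counts[w] = n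
--     return False
-- ===== Notes on version B (the rewrite author's own statement) =====
-- stated objective: alternative
-- what changed: Replaced the two-table version (build a full Counter, test all its values, then a second generator pass summing commercial hits) with one streaming pass over the words that keeps a running per-word count and a running commercial counter and returns True early as soon as either threshold trips.
import Mathlib
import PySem

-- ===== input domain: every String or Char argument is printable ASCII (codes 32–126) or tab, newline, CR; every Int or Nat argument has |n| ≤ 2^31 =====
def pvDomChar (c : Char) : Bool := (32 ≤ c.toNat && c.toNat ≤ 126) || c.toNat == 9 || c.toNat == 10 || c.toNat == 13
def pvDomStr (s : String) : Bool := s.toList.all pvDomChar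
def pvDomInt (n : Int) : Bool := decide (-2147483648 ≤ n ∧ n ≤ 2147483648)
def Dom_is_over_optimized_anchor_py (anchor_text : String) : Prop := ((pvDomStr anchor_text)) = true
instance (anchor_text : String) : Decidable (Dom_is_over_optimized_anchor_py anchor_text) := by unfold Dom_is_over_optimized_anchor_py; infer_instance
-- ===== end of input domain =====

-- B replaces A's Counter-then-second-scan with one streaming early-exit pass; objective: alternative decomposition (same cost).

-- ===== PORT A =====
def is_over_optimized_anchor_py (anchor_text : String) : Bool :=
  let words := PySem.Str.split₀ (PySem.Str.lower anchor_text)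
  let word_counts := PySem.Dict.counter words
  if word_counts.values.any (fun count => count > 2) then true
  else
    let commercial_keywords : List String := ["buy", "cheap", "best", "top", "review", "discount"]
    if words.foldl (fun acc w => if commercial_keywords.contains w then acc + 1 else acc) (0 : Int) > 2 then true
    else false

-- ===== PORT B =====
def bKeywords : List String := ["buy", "cheap", "best", "top", "review", "discount"]

def bGo : List String → PySem.Dict String Int → Int → Bool
  | [], _, _ => false
  | w :: ws, counts, commercial =>
    let n := counts.getD w 0 + 1
    if n ≥ 3 then true
    else
      let commercial' := if w ∈ bKeywords then commercial + 1 else commercial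
      if commercial' > 2 then true
      else bGo ws (counts.insert w n) commercial'

def is_over_optimized_anchor_py_alt (anchor_text : String) : Bool :=
  bGo (PySem.Str.split₀ (PySem.Str.lower anchor_text)) PySem.Dict.empty 0

-- ===== PRECONDITION & SPEC =====
def Spec_is_over_optimized_anchor_py (anchor_text : String) (out : Bool) : Prop := out = is_over_optimized_anchor_py_alt anchor_text
instance (anchor_text : String) (out : Bool) : Decidable (Spec_is_over_optimized_anchor_py anchor_text out) := by unfold Spec_is_over_optimized_anchor_py; infer_instance

-- ===== CLAIM (what is proved, stated in full; the proofs are below) =====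
def Claim_equal_is_over_optimized_anchor_py : Prop := ∀ (anchor_text : String), Dom_is_over_optimized_anchor_py anchor_text → Spec_is_over_optimized_anchor_py anchor_text (is_over_optimized_anchor_py anchor_text)

-- ===== LEMMAS AND PROOFS =====

-- The streaming pass equals the two global threshold tests, as long as no processed
-- count already exceeds 2 (the invariant the early exits maintain).
lemma bGo_eq (ws : List String) (d : PySem.Dict String Int) (c : Int)
    (hd : ∀ w, d.getD w 0 ≤ 2) (hc : c ≤ 2) :
    bGo ws d c =
      (ws.any (fun w => decide (d.getD w 0 + (ws.count w : Int) > 2)) ||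
       decide (c + (ws.countP (fun w => decide (w ∈ bKeywords)) : Int) > 2)) := by
  induction ws generalizing d c with
  | nil => simp [bGo]; omega
  | cons w ws ih =>
    simp only [bGo]
    by_cases h3 : d.getD w 0 + 1 ≥ 3
    · have h2 : d.getD w 0 = 2 := by have := hd w; omega
      have hmem : decide (d.getD w 0 + ((w :: ws).count w : Int) > 2) = true := by
        rw [List.count_cons_self]
        apply decide_eq_true
        push_cast
        omega
      simp only [if_pos h3, List.any_cons, hmem, Bool.true_or]
    · simp only [if_neg h3]
      set c' := if w ∈ bKeywords then c + 1 else c with hc'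
      by_cases hcc : c' > 2
      · have hkw : w ∈ bKeywords := by
          by_contra h
          rw [if_neg h] at hc'; omega
        rw [if_pos hkw] at hc'
        have hcp : decide (c + (((w :: ws).countP (fun v => decide (v ∈ bKeywords))) : Int) > 2) = true := by
          apply decide_eq_true
          simp only [List.countP_cons, hkw, decide_true, if_pos]
          push_cast
          omega
        simp only [if_pos hcc, hcp, Bool.or_true]
      · simp only [if_neg hcc]
        rw [ih (d.insert w (d.getD w 0 + 1)) c'
            (by
              intro v
              rw [PySem.Dict.getD_insert]
              split_ifs with hv
              · omega
              · exact hd v)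
            (by omega)]
        congr 1
        · -- the "some word repeated" disjunct
          simp only [List.any_cons]
          have hhead : decide (d.getD w 0 + ((w :: ws).count w : Int) > 2)
              = decide (((d.insert w (d.getD w 0 + 1)).getD w 0) + (ws.count w : Int) > 2) := by
            rw [PySem.Dict.getD_insert, if_pos rfl, List.count_cons_self]
            apply decide_eq_decide.mpr
            push_cast
            omega
          have htail : ws.any (fun v => decide (d.getD v 0 + ((w :: ws).count v : Int) > 2))
              = ws.any (fun v => decide ((d.insert w (d.getD w 0 + 1)).getD v 0 + (ws.count v : Int) > 2)) := by
            apply PySem.List.any_congr_mem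
            intro v hv
            by_cases hvw : v = w
            · subst hvw
              rw [PySem.Dict.getD_insert, if_pos rfl, List.count_cons_self]
              apply decide_eq_decide.mpr
              push_cast
              omega
            · rw [PySem.Dict.getD_insert, if_neg hvw, List.count_cons_of_ne (Ne.symm hvw)]
          rw [hhead, htail]
          cases hh : decide ((d.insert w (d.getD w 0 + 1)).getD w 0 + (ws.count w : Int) > 2) with
          | false => rw [Bool.false_or]
          | true =>
            have hgt := of_decide_eq_true hh
            rw [PySem.Dict.getD_insert, if_pos rfl] at hgt
            have hcnt : 0 < ws.count w := by omega
            have hany : ws.any (fun v => decide ((d.insert w (d.getD w 0 + 1)).getD v 0 + (ws.count v : Int) > 2)) = true :=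
              List.any_eq_true.mpr ⟨w, List.count_pos_iff.mp hcnt, hh⟩
            rw [hany, Bool.true_or]
        · -- the commercial-count disjunct
          apply decide_eq_decide.mpr
          simp only [List.countP_cons]
          by_cases hkw : w ∈ bKeywords
          · rw [if_pos hkw] at hc'
            simp only [hkw, decide_true, if_pos]
            push_cast
            omega
          · rw [if_neg hkw] at hc'
            simp [hc', hkw]

-- A's first test over the Counter's values equals an `any` over the word list itself.
lemma counter_values_any (ws : List String) :
    ((PySem.Dict.counter ws).values.any (fun count => count > 2))
      = ws.any (fun w => decide ((ws.count w : Int) > 2)) := by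
  have h : (PySem.Dict.counter ws).values
      = (PySem.Set.ofList ws).map (fun k => ((ws.count k : Int))) := by
    show ((PySem.Dict.counter ws).items.map (·.2)) = _
    rw [PySem.Dict.items_counter]
    simp [List.map_map, Function.comp_def]
  rw [h]
  simp only [List.any_map, Function.comp_def]
  cases hb : ws.any (fun w => decide ((ws.count w : Int) > 2)) with
  | true =>
    simp only [List.any_eq_true] at hb ⊢
    obtain ⟨w, hw, hgt⟩ := hb
    exact ⟨w, (PySem.Set.mem_ofList _ _).mpr hw, hgt⟩
  | false =>
    simp only [List.any_eq_false] at hb ⊢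
    intro w hw
    exact hb w ((PySem.Set.mem_ofList _ _).mp hw)

-- ===== VERDICT (by name: the statement is the Claim_ definition above) =====
theorem is_over_optimized_anchor_py_spec : Claim_equal_is_over_optimized_anchor_py := by
  intro anchor_text _
  show is_over_optimized_anchor_py anchor_text = is_over_optimized_anchor_py_alt anchor_text
  simp only [is_over_optimized_anchor_py, is_over_optimized_anchor_py_alt]
  set ws := PySem.Str.split₀ (PySem.Str.lower anchor_text) with hws
  clear hws
  rw [bGo_eq ws PySem.Dict.empty 0 (fun w => by rw [PySem.Dict.getD_empty]; omega) (by omega)]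
  rw [PySem.List.foldl_if_add_one]
  simp only [PySem.Dict.getD_empty, zero_add]
  rw [counter_values_any]
  have hpred : (["buy", "cheap", "best", "top", "review", "discount"] : List String).contains
      = (fun w => decide (w ∈ bKeywords)) := by
    funext w
    rw [List.contains_eq_mem, bKeywords]
  rw [hpred]
  cases ws.any (fun w => decide ((ws.count w : Int) > 2)) with
  | true => rfl
  | false =>
    show (if ((ws.countP (fun w => decide (w ∈ bKeywords)) : Int) > 2) then true else false) = _
    rw [Bool.false_or]
    split_ifs with h
    · exact (decide_eq_true h).symm
    · exact (decide_eq_false h).symm
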